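-- pv_equiv track=rewrite | github.com/23andMe/bonsaitree | bonsaitree/v3/pedigrees.py | get_one_way_paths
-- ===== SOURCE A (Python) =====
-- def get_one_way_paths(
--     node_dict : dict[int, dict[int, int]],
--     i : int,
-- ):
--     """
--     Find all paths extending upward/downward from i.
--
--     if node_dict is an up_node_dict, find all paths extending upward
--
--     if node_dict is a down_node_dict, find all paths extending downward
--     """
--
--     if i not in node_dict:
--         return [[i]]
--     if node_dict[i] == {}:
--         return [[i]]
--
--     path_list = []
--     for j in node_dict[i]:
--         j_paths = get_one_way_paths(node_dict, j)
--         j_paths = [[i] + p for p in j_paths]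
--         path_list += j_paths
--
--     return path_list
-- ===== SOURCE B (Python) =====
-- def get_one_way_paths(
--     node_dict,
--     i,
-- ):
--     """Iterative DFS with an explicit stack of (node, prefix) pairs."""
--     out = []
--     stack = [(i, [])]
--     while stack:
--         n, prefix = stack.pop()
--         children = node_dict.get(n)
--         if not children:
--             out.append(prefix + [n])
--         else:
--             path = prefix + [n]
--             for j in reversed(children):
--                 stack.append((j, path))
--     return out
-- ===== Notes on version B (the rewrite author's own statement) =====
-- stated objective: alternative
-- what changed: Replaces A's recursion by an iterative depth-first search over an explicit stack of (node, path-prefix) pairs, pushing children in reversed order so the LIFO stack reproduces the recursion's left-to-right path order; paths are emitted into a single output list instead of being rebuilt by list concatenation at every recursion level.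
import Mathlib
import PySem

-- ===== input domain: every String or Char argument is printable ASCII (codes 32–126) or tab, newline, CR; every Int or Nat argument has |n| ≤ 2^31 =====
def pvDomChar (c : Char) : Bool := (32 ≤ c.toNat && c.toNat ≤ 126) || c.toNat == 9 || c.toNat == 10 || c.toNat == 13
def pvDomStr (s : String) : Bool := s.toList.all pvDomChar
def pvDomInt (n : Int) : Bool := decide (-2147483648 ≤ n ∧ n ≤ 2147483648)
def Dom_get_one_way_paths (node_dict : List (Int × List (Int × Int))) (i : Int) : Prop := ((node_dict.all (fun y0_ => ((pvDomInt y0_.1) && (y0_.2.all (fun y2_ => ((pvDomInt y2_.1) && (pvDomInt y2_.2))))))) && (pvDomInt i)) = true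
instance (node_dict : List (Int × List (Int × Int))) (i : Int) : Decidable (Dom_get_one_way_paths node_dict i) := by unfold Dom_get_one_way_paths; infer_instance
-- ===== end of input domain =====

-- B replaces A's recursion by an iterative DFS over an explicit stack of (node, prefix) pairs,
-- same output in the same order (objective: alternative decomposition).

-- dict membership/lookup on the assoc list (first match), shared by both ports
def pvLookup : List (Int × List (Int × Int)) → Int → Option (List (Int × Int))
  | [], _ => none
  | (k, v) :: rest, x => if k = x then some v else pvLookup rest x

-- ===== PORT A =====
-- A's recursion, with a fuel guard for totality ([] at fuel 0 is unreachable under Pre_: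
-- on inputs with no cycle reachable from i, the recursion depth is at most #keys + 1).
def pvGoA (d : List (Int × List (Int × Int))) : Nat → Int → List (List Int)
  | 0, _ => []
  | fuel + 1, i =>
    match pvLookup d i with
    | none => [[i]]                                   -- if i not in node_dict
    | some ch =>
      if ch = [] then [[i]]                           -- if node_dict[i] == {}
      else ch.foldl (fun acc j => acc ++ (pvGoA d fuel j.1).map (fun p => i :: p)) []

def get_one_way_paths (node_dict : List (Int × List (Int × Int))) (i : Int) : List (List Int) :=
  pvGoA node_dict (node_dict.length + 1) i

-- ===== PORT B =====
-- bound on the number of children of any node; only used by pvGoB's termination measure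
def pvMaxCh (d : List (Int × List (Int × Int))) : Nat :=
  d.foldl (fun m p => max m p.2.length) 0

theorem pvFoldMax_mono (l : List (Int × List (Int × Int))) :
    ∀ {m m' : Nat}, m ≤ m' → l.foldl (fun a q => max a q.2.length) m ≤ l.foldl (fun a q => max a q.2.length) m' := by
  induction l with
  | nil => intro m m' h; simpa using h
  | cons q r ihr => intro m m' h; exact ihr (max_le_max_right _ h)

theorem pvFoldMax_le_init (l : List (Int × List (Int × Int))) (m : Nat) :
    m ≤ l.foldl (fun a q => max a q.2.length) m := by
  induction l generalizing m with
  | nil => simp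
  | cons q r ihr => exact le_trans (le_max_left _ _) (ihr _)

theorem pvLookup_length_le (d : List (Int × List (Int × Int))) (x : Int)
    (ch : List (Int × Int)) (h : pvLookup d x = some ch) : ch.length ≤ pvMaxCh d := by
  induction d with
  | nil => simp [pvLookup] at h
  | cons p rest ih =>
    simp only [pvLookup] at h
    by_cases hk : p.1 = x
    · simp [hk] at h
      subst h
      simpa [pvMaxCh] using le_trans (le_max_right 0 _) (pvFoldMax_le_init rest _)
    · simp [hk] at h
      exact le_trans (ih h) (by simpa [pvMaxCh] using pvFoldMax_mono rest (Nat.zero_le (max 0 p.2.length)))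

-- B's loop: a stack of (fuel, node, prefix) entries popped from the head (= the top of Python's
-- list stack); consing the children in dict order at the head is exactly Python B's
-- reversed() append loop.  The per-entry fuel is a totality guard only (never exhausted under Pre_).
def pvGoB (d : List (Int × List (Int × Int))) :
    List (Nat × Int × List Int) → List (List Int) → List (List Int)
  | [], acc => acc
  | (0, _, _) :: rest, acc => pvGoB d rest acc
  | (f + 1, n, p) :: rest, acc =>
    match h : pvLookup d n with
    | none => pvGoB d rest (acc ++ [p ++ [n]])        -- leaf: not children
    | some ch =>
      if hch : ch = [] then pvGoB d rest (acc ++ [p ++ [n]])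
      else pvGoB d ((ch.map (fun j => (f, j.1, p ++ [n]))) ++ rest) acc
termination_by stack _ => (stack.map (fun e => (pvMaxCh d + 2) ^ e.1)).sum
decreasing_by
  all_goals simp [List.map_map, Function.comp_def]
  · have hle : ch.length ≤ pvMaxCh d := pvLookup_length_le d n ch h
    rw [pow_succ]
    calc ch.length * (pvMaxCh d + 2) ^ f < (pvMaxCh d + 2) * (pvMaxCh d + 2) ^ f :=
          Nat.mul_lt_mul_of_lt_of_le (by omega) (le_refl _) (Nat.pow_pos (by omega))
      _ = (pvMaxCh d + 2) ^ f * (pvMaxCh d + 2) := by ring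

def get_one_way_paths_alt (node_dict : List (Int × List (Int × Int))) (i : Int) : List (List Int) :=
  pvGoB node_dict [(node_dict.length + 1, i, [])] []

-- ===== PRECONDITION & SPEC =====
-- children of a node, as node ids (first matching entry, like a dict lookup)
def pvChildren (d : List (Int × List (Int × Int))) (a : Int) : List Int :=
  (((d.find? (fun q => q.1 == a)).map (·.2)).getD []).map (·.1)

-- one saturation step: add every child of every node of the current set
def pvStepSet (d : List (Int × List (Int × Int))) (s : List Int) : List Int :=
  s.foldl (fun t a => (pvChildren d a).foldl PySem.Set.add t) s

def pvIter (d : List (Int × List (Int × Int))) : Nat → List Int → List Int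
  | 0, s => s
  | k + 1, s => pvIter d k (pvStepSet d s)

-- the nodes reachable from a in at least one step (|d|+1 saturation rounds saturate)
def pvReach1 (d : List (Int × List (Int × Int))) (a : Int) : List Int :=
  pvIter d (d.length + 1) (PySem.Set.ofList (pvChildren d a))

-- Pre_ excludes exactly the inputs with a cycle reachable from i: there Python A's
-- recursion never terminates (RecursionError).
def Pre_get_one_way_paths (node_dict : List (Int × List (Int × Int))) (i : Int) : Prop :=
  ∀ a ∈ (i :: pvReach1 node_dict i), a ∉ pvReach1 node_dict a
instance (node_dict : List (Int × List (Int × Int))) (i : Int) : Decidable (Pre_get_one_way_paths node_dict i) := by unfold Pre_get_one_way_paths; infer_instance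

def pvWitness_get_one_way_paths : (List (Int × List (Int × Int))) × Int :=
  ([(1, [(2, 0), (3, 0)]), (2, [(3, 0)])], 1)

def Spec_get_one_way_paths (node_dict : List (Int × List (Int × Int))) (i : Int) (out : List (List Int)) : Prop := out = get_one_way_paths_alt node_dict i
instance (node_dict : List (Int × List (Int × Int))) (i : Int) (out : List (List Int)) : Decidable (Spec_get_one_way_paths node_dict i out) := by unfold Spec_get_one_way_paths; infer_instance

-- ===== CLAIM (what is proved, stated in full; the proofs are below) =====
def Claim_equal_get_one_way_paths : Prop := ∀ (node_dict : List (Int × List (Int × Int))) (i : Int), Dom_get_one_way_paths node_dict i → Pre_get_one_way_paths node_dict i → Spec_get_one_way_paths node_dict i (get_one_way_paths node_dict i)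

-- ===== LEMMAS AND PROOFS =====
-- invariant of B's loop: popping one stack entry contributes exactly the recursion's
-- paths from that node, each prefixed with the entry's prefix, in the recursion's order
theorem pvGoB_step (d : List (Int × List (Int × Int))) :
    ∀ (f : Nat) (n : Int) (p : List Int) (rest : List (Nat × Int × List Int)) (acc : List (List Int)),
      pvGoB d ((f, n, p) :: rest) acc
        = pvGoB d rest (acc ++ (pvGoA d f n).map (fun t => p ++ t)) := by
  intro f
  induction f with
  | zero => intro n p rest acc; simp [pvGoB, pvGoA]
  | succ f ih =>
    intro n p rest acc
    have inner : ∀ (L : List (Int × Int)) (rest : List (Nat × Int × List Int))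
        (acc : List (List Int)) (q : List Int),
        pvGoB d ((L.map (fun j => (f, j.1, q))) ++ rest) acc
          = pvGoB d rest (acc ++ L.flatMap (fun j => (pvGoA d f j.1).map (fun t => q ++ t))) := by
      intro L
      induction L with
      | nil => intro rest acc q; simp
      | cons j L ihL =>
        intro rest acc q
        simp only [List.map_cons, List.cons_append, ih, ihL, List.flatMap_cons,
          List.append_assoc]
    rw [pvGoB]
    cases hl : pvLookup d n with
    | none => simp [pvGoA, hl]
    | some ch =>
      by_cases hch : ch = []
      · subst hch; simp [pvGoA, hl]
      · simp only [hch, dite_false]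
        rw [inner]
        congr 1
        simp only [pvGoA, hl]
        rw [if_neg hch, PySem.List.foldl_append_eq_flatMap]
        simp [List.map_flatMap, List.map_map, Function.comp_def]

-- ===== VERDICT (by name: the statement is the Claim_ definition above) =====
theorem get_one_way_paths_spec : Claim_equal_get_one_way_paths := by
  intro d i _ _
  unfold Spec_get_one_way_paths get_one_way_paths get_one_way_paths_alt
  rw [pvGoB_step]
  simp [pvGoB]
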